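-- pv_equiv track=rewrite | github.com/rubenmarti1972/suelas-toty | scripts/generate_product_images.py | downscale
-- ===== SOURCE A (Python) =====
-- from typing import Dict, List, Tuple
--
-- Color = Tuple[int, int, int]
--
-- def downscale(pixels: List[List[Color]], factor: int) -> List[List[Color]]:
--     src_h = len(pixels)
--     src_w = len(pixels[0])
--     dst_h = src_h // factor
--     dst_w = src_w // factor
--     result = [[(0, 0, 0) for _ in range(dst_w)] for _ in range(dst_h)]
--     for y in range(dst_h):
--         for x in range(dst_w):
--             total = [0, 0, 0]
--             for dy in range(factor):
--                 for dx in range(factor):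
--                     r, g, b = pixels[y * factor + dy][x * factor + dx]
--                     total[0] += r
--                     total[1] += g
--                     total[2] += b
--             count = factor * factor
--             result[y][x] = (total[0] // count, total[1] // count, total[2] // count)
--     return result
-- ===== SOURCE B (Python) =====
-- def downscale(pixels, factor):
--     src_h = len(pixels)
--     src_w = len(pixels[0])
--     dst_h = src_h // factor
--     dst_w = src_w // factor
--     sums = {}
--     for y, row in enumerate(pixels[: dst_h * factor]):
--         by = y // factor
--         for x, (r, g, b) in enumerate(row[: dst_w * factor]):
--             sr, sg, sb = sums.get((by, x // factor), (0, 0, 0))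
--             sums[(by, x // factor)] = (sr + r, sg + g, sb + b)
--     count = factor * factor
--     return [
--         [
--             (sr // count, sg // count, sb // count)
--             for bx in range(dst_w)
--             for (sr, sg, sb) in [sums.get((by, bx), (0, 0, 0))]
--         ]
--         for by in range(dst_h)
--     ]
-- ===== Notes on version B (the rewrite author's own statement) =====
-- stated objective: alternative
-- what changed: Replaced A's per-block gather (four nested loops re-reading the source per destination cell) by a single scatter pass over the used source region that accumulates per-block RGB sums in a dictionary keyed by (y//factor, x//factor), followed by one averaging pass.
import Mathlib
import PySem

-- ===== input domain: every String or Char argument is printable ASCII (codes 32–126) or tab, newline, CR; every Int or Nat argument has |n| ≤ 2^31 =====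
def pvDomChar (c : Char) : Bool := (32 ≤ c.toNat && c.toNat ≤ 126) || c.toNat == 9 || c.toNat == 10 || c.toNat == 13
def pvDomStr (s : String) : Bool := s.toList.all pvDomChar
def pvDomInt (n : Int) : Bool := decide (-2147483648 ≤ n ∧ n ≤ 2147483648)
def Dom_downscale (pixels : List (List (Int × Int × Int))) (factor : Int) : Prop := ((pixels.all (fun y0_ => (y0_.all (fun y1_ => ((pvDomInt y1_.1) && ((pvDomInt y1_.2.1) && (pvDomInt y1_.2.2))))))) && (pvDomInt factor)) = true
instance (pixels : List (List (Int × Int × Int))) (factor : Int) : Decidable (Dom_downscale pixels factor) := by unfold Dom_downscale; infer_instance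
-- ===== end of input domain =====

-- B replaces A's per-destination-block gather (4 nested loops) by one scatter pass over the
-- used source region accumulating block sums in a dict keyed by (y//factor, x//factor),
-- then one averaging pass; equal cost, different traversal (objective: alternative).

-- ===== PORT A =====
-- literal port of A; pixels[i][j] is PySem.List.pyGetD (in range under Pre_downscale)
def downscale (pixels : List (List (Int × Int × Int))) (factor : Int) : List (List (Int × Int × Int)) :=
  let src_h : Int := pixels.length
  let src_w : Int := ((PySem.List.pyGet? pixels 0).getD []).length        -- len(pixels[0]); pixels ≠ [] under Pre_
  let dst_h : Int := PySem.Int.floordiv src_h factor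
  let dst_w : Int := PySem.Int.floordiv src_w factor
  let result := (PySem.List.pyRange 0 dst_h 1).map (fun _ =>
    (PySem.List.pyRange 0 dst_w 1).map (fun _ => ((0, 0, 0) : Int × Int × Int)))
  (PySem.List.pyRange 0 dst_h 1).foldl (fun result y =>
    (PySem.List.pyRange 0 dst_w 1).foldl (fun result x =>
      let total := (PySem.List.pyRange 0 factor 1).foldl (fun t dy =>
        (PySem.List.pyRange 0 factor 1).foldl (fun t dx =>
          let p := PySem.List.pyGetD (PySem.List.pyGetD pixels (y * factor + dy) []) (x * factor + dx) (0, 0, 0)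
          (t.1 + p.1, t.2.1 + p.2.1, t.2.2 + p.2.2)) t) ((0 : Int), (0 : Int), (0 : Int))
      let count := factor * factor
      -- result[y][x] = (...): y, x are in range (they come from the ranges above), so .toNat is exact
      result.set y.toNat ((result.getD y.toNat []).set x.toNat
        (PySem.Int.floordiv total.1 count, PySem.Int.floordiv total.2.1 count,
         PySem.Int.floordiv total.2.2 count))) result) result

-- ===== PORT B =====
def downscale_alt (pixels : List (List (Int × Int × Int))) (factor : Int) : List (List (Int × Int × Int)) :=
  let src_h : Int := pixels.length
  let src_w : Int := ((PySem.List.pyGet? pixels 0).getD []).length        -- len(pixels[0]); pixels ≠ [] under Pre_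
  let dst_h : Int := PySem.Int.floordiv src_h factor
  let dst_w : Int := PySem.Int.floordiv src_w factor
  let sums : PySem.Dict (Int × Int) (Int × Int × Int) :=
    (PySem.List.enumerate (PySem.List.slice pixels none (some (dst_h * factor))) 0).foldl
      (fun sums yrow =>
        let y := yrow.1
        let row := yrow.2
        let by_ := PySem.Int.floordiv y factor
        (PySem.List.enumerate (PySem.List.slice row none (some (dst_w * factor))) 0).foldl
          (fun sums xp =>
            let x := xp.1
            let p := xp.2
            let s := sums.getD (by_, PySem.Int.floordiv x factor) ((0 : Int), (0 : Int), (0 : Int))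
            sums.insert (by_, PySem.Int.floordiv x factor) (s.1 + p.1, s.2.1 + p.2.1, s.2.2 + p.2.2))
          sums)
      PySem.Dict.empty
  let count := factor * factor
  (PySem.List.pyRange 0 dst_h 1).map (fun by_ =>
    (PySem.List.pyRange 0 dst_w 1).map (fun bx =>
      let s := sums.getD (by_, bx) ((0 : Int), (0 : Int), (0 : Int))
      (PySem.Int.floordiv s.1 count, PySem.Int.floordiv s.2.1 count, PySem.Int.floordiv s.2.2 count)))

-- ===== PRECONDITION & SPEC =====
-- Pre_ excludes exactly the inputs where Python A raises: empty pixels (IndexError on pixels[0]),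
-- factor = 0 (ZeroDivisionError), and, for positive factor, inputs where some source row inside the
-- used region is shorter than dst_w*factor (IndexError on pixels[...][...]).
def Pre_downscale (pixels : List (List (Int × Int × Int))) (factor : Int) : Prop :=
  pixels ≠ [] ∧ factor ≠ 0 ∧
  (0 < factor →
    ∀ y ∈ List.range ((PySem.Int.floordiv (pixels.length : Int) factor * factor).toNat),
      (PySem.Int.floordiv ((pixels.headD []).length : Int) factor * factor).toNat ≤ (pixels.getD y []).length)
instance (pixels : List (List (Int × Int × Int))) (factor : Int) : Decidable (Pre_downscale pixels factor) := by
  unfold Pre_downscale; infer_instance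

def pvWitness_downscale : (List (List (Int × Int × Int))) × Int :=
  ([[(10, 20, 30), (2, 4, 6)], [(0, 0, 0), (4, 8, 12)]], 2)

def Spec_downscale (pixels : List (List (Int × Int × Int))) (factor : Int) (out : List (List (Int × Int × Int))) : Prop := out = downscale_alt pixels factor
instance (pixels : List (List (Int × Int × Int))) (factor : Int) (out : List (List (Int × Int × Int))) : Decidable (Spec_downscale pixels factor out) := by unfold Spec_downscale; infer_instance

-- ===== CLAIM (what is proved, stated in full; the proofs are below) =====
def Claim_equal_downscale : Prop := ∀ (pixels : List (List (Int × Int × Int))) (factor : Int), Dom_downscale pixels factor → Pre_downscale pixels factor → Spec_downscale pixels factor (downscale pixels factor)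

-- ===== LEMMAS AND PROOFS =====

-- triple arithmetic (Python's total[0]/[1]/[2] accumulators, as one value)
def pvAdd3 (a b : Int × Int × Int) : Int × Int × Int := (a.1 + b.1, a.2.1 + b.2.1, a.2.2 + b.2.2)
def pvZero3 : Int × Int × Int := (0, 0, 0)
def pvSum3 (l : List (Int × Int × Int)) : Int × Int × Int := l.foldl pvAdd3 pvZero3
def pvPix (pixels : List (List (Int × Int × Int))) (y x : Nat) : Int × Int × Int :=
  (pixels.getD y []).getD x (0, 0, 0)
def pvBlk (pixels : List (List (Int × Int × Int))) (fn y x : Nat) : Int × Int × Int :=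
  pvSum3 ((List.range fn).map (fun dy =>
    pvSum3 ((List.range fn).map (fun dx => pvPix pixels (y * fn + dy) (x * fn + dx)))))
def pvAvg (pixels : List (List (Int × Int × Int))) (fn : Nat) (f : Int) (y x : Nat) : Int × Int × Int :=
  let s := pvBlk pixels fn y x
  (PySem.Int.floordiv s.1 (f * f), PySem.Int.floordiv s.2.1 (f * f), PySem.Int.floordiv s.2.2 (f * f))

theorem pvAdd3_assoc (a b c : Int × Int × Int) : pvAdd3 (pvAdd3 a b) c = pvAdd3 a (pvAdd3 b c) := by
  simp [pvAdd3, Prod.ext_iff]; omega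

theorem pvAdd3_zero (a : Int × Int × Int) : pvAdd3 a pvZero3 = a := by
  simp [pvAdd3, pvZero3]

theorem pvZero3_add (a : Int × Int × Int) : pvAdd3 pvZero3 a = a := by
  simp [pvAdd3, pvZero3]

theorem pvFoldl_add3 (l : List (Int × Int × Int)) : ∀ z, l.foldl pvAdd3 z = pvAdd3 z (pvSum3 l) := by
  induction l with
  | nil => intro z; simp [pvSum3, pvAdd3_zero]
  | cons a l ih =>
    intro z
    have h1 : pvSum3 (a :: l) = pvAdd3 a (pvSum3 l) := by
      show List.foldl pvAdd3 pvZero3 (a :: l) = _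
      rw [List.foldl_cons, ih, pvZero3_add]
    rw [List.foldl_cons, ih, h1, pvAdd3_assoc]

theorem pvSum3_cons (a : Int × Int × Int) (l : List (Int × Int × Int)) :
    pvSum3 (a :: l) = pvAdd3 a (pvSum3 l) := by
  rw [pvSum3, List.foldl_cons, pvFoldl_add3, pvZero3_add]

theorem pvSum3_singleton (a : Int × Int × Int) : pvSum3 [a] = a := by
  rw [pvSum3_cons]; exact pvAdd3_zero a

theorem pvSum3_append (l₁ l₂ : List (Int × Int × Int)) :
    pvSum3 (l₁ ++ l₂) = pvAdd3 (pvSum3 l₁) (pvSum3 l₂) := by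
  rw [pvSum3, List.foldl_append, pvFoldl_add3]
  rfl

theorem pvSum3_zero (l : List (Int × Int × Int)) (h : ∀ x ∈ l, x = pvZero3) : pvSum3 l = pvZero3 := by
  induction l with
  | nil => rfl
  | cons a l ih =>
    rw [pvSum3_cons, h a (by simp), ih (fun x hx => h x (by simp [hx])), pvAdd3_zero]

theorem pvSum3_flatMap {β : Type} (l : List β) (g : β → List (Int × Int × Int)) :
    pvSum3 (l.flatMap g) = pvSum3 (l.map (fun x => pvSum3 (g x))) := by
  induction l with
  | nil => rfl
  | cons a l ih => rw [List.flatMap_cons, pvSum3_append, List.map_cons, pvSum3_cons, ih]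

theorem pvFoldl_body {β : Type} (l : List β) (g : β → Int × Int × Int) (z : Int × Int × Int) :
    l.foldl (fun t e => pvAdd3 t (g e)) z = pvAdd3 z (pvSum3 (l.map g)) := by
  rw [← List.foldl_map, pvFoldl_add3]

theorem pvSum3_map_single (n k : Nat) (G : Nat → Int × Int × Int) (hk : k < n)
    (hz : ∀ i, i < n → i ≠ k → G i = pvZero3) :
    pvSum3 ((List.range n).map G) = G k := by
  induction n with
  | zero => omega
  | succ n ih =>
    rw [List.range_succ, List.map_append, pvSum3_append]
    simp only [List.map_cons, List.map_nil, pvSum3_singleton]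
    by_cases h : k = n
    · subst h
      rw [pvSum3_zero _ (by
        intro x hx
        simp only [List.mem_map, List.mem_range] at hx
        obtain ⟨i, hi, rfl⟩ := hx
        exact hz i (by omega) (by omega)), pvZero3_add]
    · rw [ih (by omega) (fun i hi hne => hz i (by omega) hne), hz n (by omega) (fun e => h e.symm),
        pvAdd3_zero]

theorem pvRange_mul (a b : Nat) :
    List.range (a * b) = (List.range a).flatMap (fun i => (List.range b).map (fun j => i * b + j)) := by
  induction a with
  | zero => simp
  | succ a ih =>
    rw [Nat.succ_mul, List.range_add, ih, List.range_succ, List.flatMap_append]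
    simp [List.range_add]

theorem pvFoldl_flatMap {β γ σ : Type} (l : List β) (g : β → List γ) (step : σ → γ → σ) :
    ∀ s, (l.flatMap g).foldl step s = l.foldl (fun s b => (g b).foldl step s) s := by
  induction l with
  | nil => intro s; rfl
  | cons a l ih => intro s; rw [List.flatMap_cons, List.foldl_append, List.foldl_cons, ih]

-- grid-of-lists update loops (A writes result[y][x] in place)
theorem pvRow_full {α : Type} (V : Nat → α) :
    ∀ (n : Nat) (row : List α), n ≤ row.length →
    (List.range n).foldl (fun r x => r.set x (V x)) row = (List.range n).map V ++ row.drop n := by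
  intro n
  induction n with
  | zero => intro row _; simp
  | succ n ih =>
    intro row h
    rw [List.range_succ, List.foldl_append, List.foldl_cons, List.foldl_nil, ih row (by omega)]
    have hn : n < row.length := by omega
    rw [List.drop_eq_getElem_cons hn, List.set_append_right _ _ (by simp), List.map_append]
    simp only [List.length_map, List.length_range, Nat.sub_self, List.set_cons_zero, List.map_cons, List.map_nil, List.append_assoc, List.singleton_append]

theorem pvInner_iso {α β : Type} (l : List β) (y : Nat) (F : List α → β → List α) (d : List α) :
    ∀ (res : List (List α)), y < res.length →
    l.foldl (fun res b => res.set y (F (res.getD y d) b)) res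
      = res.set y (l.foldl F (res.getD y d)) := by
  induction l with
  | nil =>
    intro res hy
    have : res.getD y d = res[y] := by
      simp [List.getD, List.getElem?_eq_getElem hy]
    simp only [List.foldl_nil, this, List.set_getElem_self]
  | cons b l ih =>
    intro res hy
    rw [List.foldl_cons, ih (res.set y (F (res.getD y d) b)) (by simpa using hy), List.set_set]
    congr 1
    rw [List.foldl_cons]
    congr 1
    simp [List.getD, List.getElem?_set_self, hy]

theorem pvGrid_full {α β : Type} (Wl : List β) (F : Nat → List α → β → List α) (d : List α) :
    ∀ (n : Nat) (res : List (List α)), n ≤ res.length →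
    (List.range n).foldl
      (fun res y => Wl.foldl (fun res b => res.set y (F y (res.getD y d) b)) res) res
      = (List.range n).map (fun y => Wl.foldl (F y) (res.getD y d)) ++ res.drop n := by
  intro n
  induction n with
  | zero => intro res _; simp
  | succ n ih =>
    intro res h
    rw [List.range_succ, List.foldl_append, List.foldl_cons, List.foldl_nil, ih res (by omega)]
    have hn : n < res.length := by omega
    rw [pvInner_iso Wl n (F n) d _ (by simp; omega)]
    have hget : ((List.range n).map (fun y => Wl.foldl (F y) (res.getD y d)) ++ res.drop n).getD n d
        = res.getD n d := by
      simp [List.getD, List.getElem?_append_right, List.getElem?_drop]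
    rw [hget, List.drop_eq_getElem_cons hn, List.set_append_right _ _ (by simp), List.map_append]
    simp only [List.length_map, List.length_range, Nat.sub_self, List.set_cons_zero, List.map_cons, List.map_nil, List.append_assoc, List.singleton_append]

-- accumulate-into-dict loop (B's sums[key] = sums.get(key, z) + p)
theorem pvDictAcc (ps : List ((Int × Int) × (Int × Int × Int))) :
    ∀ (d : PySem.Dict (Int × Int) (Int × Int × Int)) (k : Int × Int),
    (ps.foldl (fun d u => d.insert u.1 (pvAdd3 (d.getD u.1 pvZero3) u.2)) d).getD k pvZero3
      = pvAdd3 (d.getD k pvZero3) (pvSum3 ((ps.filter (fun u => u.1 == k)).map (fun u => u.2))) := by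
  induction ps with
  | nil => intro d k; simp [pvSum3, pvAdd3_zero]
  | cons u ps ih =>
    intro d k
    rw [List.foldl_cons, ih, PySem.Dict.getD_insert]
    by_cases h : k = u.1
    · subst h
      simp only [List.filter_cons, beq_self_eq_true, if_pos rfl, List.map_cons, pvSum3_cons,
        ite_true]
      rw [← pvAdd3_assoc]
    · have : (u.1 == k) = false := by simp [Ne.symm h]
      simp [List.filter_cons, this, h]

theorem pvTotal_eq (pixels : List (List (Int × Int × Int))) (f : Int) (fn : Nat) (hf : f = (fn : Int))
    (y x : Nat) :
    (PySem.List.pyRange 0 f 1).foldl (fun t dy =>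
      (PySem.List.pyRange 0 f 1).foldl (fun t dx =>
        let p := PySem.List.pyGetD (PySem.List.pyGetD pixels ((y : Int) * f + dy) [])
          ((x : Int) * f + dx) (0, 0, 0)
        (t.1 + p.1, t.2.1 + p.2.1, t.2.2 + p.2.2)) t) ((0 : Int), (0 : Int), (0 : Int))
      = pvBlk pixels fn y x := by
  subst hf
  rw [PySem.List.pyRange_zero_natCast]
  simp only [List.foldl_map, ← Nat.cast_mul, ← Nat.cast_add, PySem.List.pyGetD_natCast]
  have hin : ∀ (t : Int × Int × Int) (dy : Nat),
      (List.range fn).foldl (fun t dx =>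
        let p := (pixels.getD (y * fn + dy) []).getD (x * fn + dx) (0, 0, 0)
        (t.1 + p.1, t.2.1 + p.2.1, t.2.2 + p.2.2)) t
      = pvAdd3 t (pvSum3 ((List.range fn).map (fun dx => pvPix pixels (y * fn + dy) (x * fn + dx)))) :=
    fun t dy => pvFoldl_body (List.range fn) (fun dx => pvPix pixels (y * fn + dy) (x * fn + dx)) t
  simp only [hin]
  rw [pvFoldl_body (List.range fn)
    (fun dy => pvSum3 ((List.range fn).map (fun dx => pvPix pixels (y * fn + dy) (x * fn + dx))))]
  rw [show ((0 : Int), (0 : Int), (0 : Int)) = pvZero3 from rfl, pvZero3_add, pvBlk]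

theorem pvA_eq (pixels : List (List (Int × Int × Int))) (f : Int) (fn Hn Wn : Nat)
    (hf : f = (fn : Int))
    (hH : PySem.Int.floordiv (pixels.length : Int) f = (Hn : Int))
    (hW : PySem.Int.floordiv ((((PySem.List.pyGet? pixels 0).getD []).length : Int)) f = (Wn : Int)) :
    downscale pixels f = (List.range Hn).map (fun y => (List.range Wn).map (fun x => pvAvg pixels fn f y x)) := by
  unfold downscale
  simp only [hH, hW, PySem.List.pyRange_zero_natCast, List.foldl_map, List.map_map,
    Int.toNat_natCast, Function.comp_def, List.map_const', List.length_range]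
  simp only [pvTotal_eq pixels f fn hf]
  rw [pvGrid_full (List.range Wn)
    (fun y row x => row.set x
      (PySem.Int.floordiv (pvBlk pixels fn y x).1 (f * f),
        PySem.Int.floordiv (pvBlk pixels fn y x).2.1 (f * f),
        PySem.Int.floordiv (pvBlk pixels fn y x).2.2 (f * f))) []
    Hn _ (by simp)]
  simp only [List.drop_eq_nil_of_le (by simp : (List.replicate Hn (List.replicate Wn ((0 : Int), (0 : Int), (0 : Int)))).length ≤ Hn),
    List.append_nil]
  refine List.map_congr_left ?_
  intro y hy
  have hyH : y < Hn := List.mem_range.mp hy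
  rw [List.getD_replicate _ hyH, pvRow_full _ Wn _ (by simp)]
  simp [pvAvg]

def pvUps (pixels : List (List (Int × Int × Int))) (fn Hn Wn : Nat) :
    List ((Int × Int) × (Int × Int × Int)) :=
  (List.range (Hn * fn)).flatMap (fun y =>
    (List.range (Wn * fn)).map (fun x =>
      ((((y / fn : Nat) : Int), ((x / fn : Nat) : Int)), pvPix pixels y x)))

theorem pvDivBlock (b d fn : Nat) (hfn : 0 < fn) (hd : d < fn) : (b * fn + d) / fn = b := by
  rw [Nat.mul_comm, Nat.mul_add_div hfn, Nat.div_eq_of_lt hd, Nat.add_zero]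

theorem pvFilterSum (pixels : List (List (Int × Int × Int))) (fn Hn Wn by_ bx : Nat)
    (hfn : 0 < fn) (hby : by_ < Hn) (hbx : bx < Wn) :
    pvSum3 (((pvUps pixels fn Hn Wn).filter
        (fun u => u.1 == (((by_ : Nat) : Int), ((bx : Nat) : Int)))).map (fun u => u.2))
      = pvBlk pixels fn by_ bx := by
  unfold pvUps
  rw [List.filter_flatMap, List.map_flatMap, pvSum3_flatMap]
  have hx : ∀ y : Nat,
      pvSum3 ((((List.range (Wn * fn)).map (fun x =>
          ((((y / fn : Nat) : Int), ((x / fn : Nat) : Int)), pvPix pixels y x))).filter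
          (fun u => u.1 == (((by_ : Nat) : Int), ((bx : Nat) : Int)))).map (fun u => u.2))
        = if y / fn = by_ then pvSum3 ((List.range fn).map (fun dx => pvPix pixels y (bx * fn + dx)))
          else pvZero3 := by
    intro y
    rw [List.filter_map, List.map_map]
    by_cases hyb : y / fn = by_
    · rw [if_pos hyb]
      rw [List.filter_congr (q := fun x => decide (x / fn = bx)) (by
        intro x _
        simp only [Function.comp_apply]
        rw [Bool.beq_eq_decide_eq]
        simp only [decide_eq_decide, Prod.ext_iff, hyb, Int.natCast_div]
        simp only [true_and]
        rw [← Int.natCast_div]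
        exact Nat.cast_inj)]
      rw [pvRange_mul Wn fn, List.filter_flatMap, List.map_flatMap, pvSum3_flatMap]
      rw [pvSum3_map_single Wn bx _ hbx (by
        intro bx' _ hne
        rw [List.filter_congr (q := fun _ => false) (by
          intro dx hdx
          simp only [List.mem_map, List.mem_range] at hdx
          obtain ⟨j, hj, rfl⟩ := hdx
          simp [pvDivBlock bx' j fn hfn hj, hne]), List.filter_false]
        rfl)]
      rw [List.filter_congr (q := fun _ => true) (by
        intro dx hdx
        simp only [List.mem_map, List.mem_range] at hdx
        obtain ⟨j, hj, rfl⟩ := hdx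
        simp [pvDivBlock bx j fn hfn hj]), List.filter_true, List.map_map]
      rfl
    · rw [if_neg hyb]
      rw [List.filter_congr (q := fun _ => false) (by
        intro x _
        simp only [Function.comp_apply]
        rw [Bool.beq_eq_decide_eq]
        simp only [decide_eq_false_iff_not, Prod.ext_iff, not_and]
        intro h1
        exact absurd (Nat.cast_inj.mp h1) hyb), List.filter_false]
      rfl
  simp only [hx]
  rw [pvRange_mul Hn fn, List.map_flatMap, pvSum3_flatMap]
  rw [pvSum3_map_single Hn by_ _ hby (by
    intro by' _ hne
    refine pvSum3_zero _ ?_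
    intro v hv
    simp only [List.map_map, List.mem_map, List.mem_range, Function.comp] at hv
    obtain ⟨dy, hdy, rfl⟩ := hv
    rw [pvDivBlock by' dy fn hfn hdy, if_neg hne])]
  rw [List.map_map, pvBlk]
  refine congrArg pvSum3 (List.map_congr_left ?_)
  intro dy hdy
  simp only [List.mem_range] at hdy
  simp [Function.comp, pvDivBlock by_ dy fn hfn hdy]

theorem pvGetD_take {α : Type} (l : List α) (m j : Nat) (d : α) (h : j < m) :
    (l.take m).getD j d = l.getD j d := by
  simp [List.getD, List.getElem?_take, h]

theorem pvB_eq (pixels : List (List (Int × Int × Int))) (f : Int) (fn Hn Wn : Nat)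
    (hf : f = (fn : Int)) (hfn : 0 < fn)
    (hH : PySem.Int.floordiv (pixels.length : Int) f = (Hn : Int))
    (hW : PySem.Int.floordiv ((((PySem.List.pyGet? pixels 0).getD []).length : Int)) f = (Wn : Int))
    (hHle : Hn * fn ≤ pixels.length)
    (hrow : ∀ y, y < Hn * fn → Wn * fn ≤ (pixels.getD y []).length) :
    downscale_alt pixels f = (List.range Hn).map (fun y => (List.range Wn).map (fun x => pvAvg pixels fn f y x)) := by
  unfold downscale_alt
  simp only [hH, hW]
  simp only [hf, ← Nat.cast_mul, PySem.List.slice_to_natCast]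
  have hlen1 : PySem.List.len (List.take (Hn * fn) pixels) = ((Hn * fn : Nat) : Int) := by
    simp [PySem.List.len, Nat.min_eq_left hHle]
  rw [PySem.List.enumerate_eq_map_pyRange (List.take (Hn * fn) pixels) ([] : List (Int × Int × Int)),
    hlen1, PySem.List.pyRange_zero_natCast, List.foldl_map]
  rw [List.foldl_map]
  rw [PySem.List.foldl_congr_mem _ _
    (fun s j => ((List.range (Wn * fn)).map (fun i =>
      ((((j / fn : Nat) : Int), ((i / fn : Nat) : Int)), pvPix pixels j i))).foldl
      (fun d u => d.insert u.1 (pvAdd3 (d.getD u.1 pvZero3) u.2)) s) _ ?hstep]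
  case hstep =>
    intro acc j hj
    have hj' : j < Hn * fn := List.mem_range.mp hj
    have hgd : PySem.List.pyGetD (List.take (Hn * fn) pixels) ((j : Nat) : Int) [] = pixels.getD j [] := by
      rw [PySem.List.pyGetD_natCast, pvGetD_take _ _ _ _ hj']
    simp only [hgd]
    have h2 : Wn * fn ≤ (pixels[j]?.getD []).length := by
      simpa [List.getD] using hrow j hj'
    have hlen2 : PySem.List.len (List.take (Wn * fn) (pixels.getD j [])) = ((Wn * fn : Nat) : Int) := by
      simp [PySem.List.len, Nat.min_eq_left h2, List.getD]
    rw [PySem.List.enumerate_eq_map_pyRange _ (((0, 0, 0) : Int × Int × Int)), hlen2,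
      PySem.List.pyRange_zero_natCast, List.foldl_map, List.foldl_map]
    conv_rhs => rw [List.foldl_map]
    refine PySem.List.foldl_congr_mem _ _ _ _ ?_
    intro d i hi
    have hi' : i < Wn * fn := List.mem_range.mp hi
    have hgd2 : PySem.List.pyGetD (List.take (Wn * fn) (pixels.getD j [])) ((i : Nat) : Int)
        (((0, 0, 0) : Int × Int × Int)) = pvPix pixels j i := by
      rw [PySem.List.pyGetD_natCast, pvGetD_take _ _ _ _ hi']; rfl
    simp only [hgd2, PySem.Int.floordiv_natCast]
    rfl
  rw [← pvFoldl_flatMap]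
  rw [show (List.range (Hn * fn)).flatMap (fun j => (List.range (Wn * fn)).map (fun i =>
      ((((j / fn : Nat) : Int), ((i / fn : Nat) : Int)), pvPix pixels j i)))
    = pvUps pixels fn Hn Wn from rfl]
  rw [PySem.List.pyRange_zero_natCast, PySem.List.pyRange_zero_natCast]
  simp only [List.map_map]
  refine List.map_congr_left ?_
  intro by_ hby
  have hby' : by_ < Hn := List.mem_range.mp hby
  simp only [Function.comp_apply]
  refine List.map_congr_left ?_
  intro bx hbx
  have hbx' : bx < Wn := List.mem_range.mp hbx
  simp only [Function.comp_apply]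
  rw [show (((0 : Int), (0 : Int), (0 : Int)) : Int × Int × Int) = pvZero3 from rfl]
  rw [pvDictAcc, PySem.Dict.getD_empty, pvZero3_add,
    pvFilterSum pixels fn Hn Wn by_ bx hfn hby' hbx']
  simp [pvAvg, Nat.cast_mul]

-- ===== VERDICT (by name: the statement is the Claim_ definition above) =====
theorem downscale_spec : Claim_equal_downscale := by
  intro pixels factor hdom hpre
  obtain ⟨hne, hf0, hlen⟩ := hpre
  unfold Spec_downscale
  rcases lt_trichotomy factor 0 with hneg | hz | hpos
  · -- negative factor: dst_h = src_h // factor ≤ 0, both programs return []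
    have hq := PySem.Int.floordiv_mul_add_mod (pixels.length : Int) factor
    have hr := PySem.Int.mod_neg_bounds (pixels.length : Int) hneg
    have hdh : PySem.Int.floordiv (pixels.length : Int) factor ≤ 0 := by
      by_contra h
      push_neg at h
      nlinarith [Int.natCast_nonneg pixels.length]
    unfold downscale downscale_alt
    simp [PySem.List.pyRange_one_eq_nil hdh]
  · exact absurd hz hf0
  · -- positive factor
    have hf : factor = ((factor.toNat : Nat) : Int) := (Int.toNat_of_nonneg hpos.le).symm
    set fn := factor.toNat with hfndef
    have hfn : 0 < fn := by omega
    have hH0 : 0 ≤ PySem.Int.floordiv (pixels.length : Int) factor := by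
      rw [PySem.Int.floordiv_eq_ediv_of_pos hpos]
      exact Int.ediv_nonneg (Int.natCast_nonneg _) hpos.le
    have hW0 : 0 ≤ PySem.Int.floordiv ((((PySem.List.pyGet? pixels 0).getD []).length : Int)) factor := by
      rw [PySem.Int.floordiv_eq_ediv_of_pos hpos]
      exact Int.ediv_nonneg (Int.natCast_nonneg _) hpos.le
    set Hn := (PySem.Int.floordiv (pixels.length : Int) factor).toNat with hHdef
    set Wn := (PySem.Int.floordiv ((((PySem.List.pyGet? pixels 0).getD []).length : Int)) factor).toNat
      with hWdef
    have hH : PySem.Int.floordiv (pixels.length : Int) factor = (Hn : Int) :=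
      (Int.toNat_of_nonneg hH0).symm
    have hW : PySem.Int.floordiv ((((PySem.List.pyGet? pixels 0).getD []).length : Int)) factor
        = (Wn : Int) := (Int.toNat_of_nonneg hW0).symm
    have hmulH : PySem.Int.floordiv (pixels.length : Int) factor * factor ≤ (pixels.length : Int) := by
      have h1 := PySem.Int.floordiv_mul_add_mod (pixels.length : Int) factor
      have h2 := PySem.Int.mod_nonneg (pixels.length : Int) hpos
      linarith
    have hHle : Hn * fn ≤ pixels.length := by
      have : ((Hn : Int)) * ((fn : Int)) ≤ (pixels.length : Int) := by
        rw [← hH, ← hf]; exact hmulH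
      exact_mod_cast this
    have hhead : pixels.headD [] = (PySem.List.pyGet? pixels 0).getD [] := by
      cases pixels with
      | nil => exact absurd rfl hne
      | cons a l => simp
    have hrow' : ∀ y, y < Hn * fn → Wn * fn ≤ (pixels.getD y []).length := by
      intro y hy
      have hmem : y ∈ List.range ((PySem.Int.floordiv (pixels.length : Int) factor * factor).toNat) := by
        refine List.mem_range.mpr ?_
        rw [hH, hf, ← Nat.cast_mul, Int.toNat_natCast]
        exact hy
      have := hlen hpos y hmem
      rwa [hhead, hW, hf, ← Nat.cast_mul, Int.toNat_natCast] at this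
    rw [pvA_eq pixels factor fn Hn Wn hf hH hW,
      pvB_eq pixels factor fn Hn Wn hf hfn hH hW hHle hrow']
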